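-- pv_equiv track=rewrite | github.com/minivess-mlops/minivess-mlops | tests/v2/unit/config/test_condition_name_uniqueness.py | _find_prefix_collisions
-- ===== SOURCE A (Python) =====
-- import itertools
--
-- def _find_prefix_collisions(model_names: list[str]) -> list[tuple[str, str]]:
--     """Return pairs where one model name is a prefix of another.
--
--     E.g., ("sam3", "sam3_topolora") would be a collision.
--     Uses str.startswith() — no regex (Rule #16).
--     """
--     collisions: list[tuple[str, str]] = []
--     for a, b in itertools.combinations(model_names, 2):
--         if a != b:
--             if b.startswith(a) or a.startswith(b):
--                 shorter, longer = (a, b) if len(a) <= len(b) else (b, a)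
--                 collisions.append((shorter, longer))
--     return collisions
-- ===== SOURCE B (Python) =====
-- def _find_prefix_collisions(model_names):
--     """Prefix-index algorithm: bucket names by value, emit each colliding pair
--     once from the longer name's proper prefixes, then order by encoded index pair."""
--     n = len(model_names)
--     occ = {}
--     for i, s in enumerate(model_names):
--         occ.setdefault(s, []).append(i)
--     keyed = []
--     for v, s in enumerate(model_names):
--         for L in range(len(s)):          # proper prefixes of s (including '')
--             p = s[:L]
--             for u in occ.get(p, []):
--                 lo, hi = (u, v) if u < v else (v, u)
--                 keyed.append((lo * n + hi, (p, s)))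
--     keyed.sort(key=lambda t: t[0])
--     return [pr for _, pr in keyed]
-- ===== Notes on version B (the rewrite author's own statement) =====
-- stated objective: faster
-- what changed: A tests every unordered pair with startswith (O(n^2) pair scans); B builds a hash index name->indices once, probes it with each name's proper prefixes to generate each colliding pair exactly once, and restores A's pair order by sorting on an encoded (min-index, max-index) key.
import Mathlib
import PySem

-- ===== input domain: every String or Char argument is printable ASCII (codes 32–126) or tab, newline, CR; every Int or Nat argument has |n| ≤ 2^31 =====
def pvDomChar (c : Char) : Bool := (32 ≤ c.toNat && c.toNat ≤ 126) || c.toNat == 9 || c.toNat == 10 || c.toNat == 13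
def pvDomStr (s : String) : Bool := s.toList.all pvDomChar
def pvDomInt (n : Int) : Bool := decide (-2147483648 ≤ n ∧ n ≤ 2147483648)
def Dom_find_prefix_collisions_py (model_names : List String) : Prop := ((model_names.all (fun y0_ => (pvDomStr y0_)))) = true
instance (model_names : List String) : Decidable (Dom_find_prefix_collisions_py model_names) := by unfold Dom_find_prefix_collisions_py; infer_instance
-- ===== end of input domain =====

-- B replaces A's all-pairs startswith scan by a hash index of the names probed with each
-- name's proper prefixes, then restores A's pair order by sorting on an encoded index pair.

-- ===== PORT A =====
def find_prefix_collisions_py (model_names : List String) : List (String × String) :=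
  (PySem.List.combinations model_names 2).foldl
    (fun collisions c =>
      match c with
      | [a, b] =>
        if a != b then
          if PySem.Str.startswith b a || PySem.Str.startswith a b then
            collisions ++ [if PySem.Str.len a ≤ PySem.Str.len b then (a, b) else (b, a)]
          else collisions
        else collisions
      | _ => collisions) []

-- ===== PORT B =====
def find_prefix_collisions_py_alt (model_names : List String) : List (String × String) :=
  let n : Int := PySem.List.len model_names
  let occ : PySem.Dict String (List Int) :=
    (PySem.List.enumerate model_names).foldl
      (fun occ is => occ.insert is.2 (occ.getD is.2 [] ++ [is.1])) PySem.Dict.empty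
  let keyed : List (Int × (String × String)) :=
    (PySem.List.enumerate model_names).foldl
      (fun keyed vs =>
        (PySem.List.pyRange 0 (PySem.Str.len vs.2)).foldl
          (fun keyed L =>
            let p := PySem.Str.slice vs.2 none (some L)
            (occ.getD p []).foldl
              (fun keyed u =>
                keyed ++ [(if u < vs.1 then u * n + vs.1 else vs.1 * n + u, (p, vs.2))])
              keyed)
          keyed)
      []
  (PySem.List.sorted keyed (fun t => t.1)).map (fun t => t.2)

-- ===== PRECONDITION & SPEC =====
def Spec_find_prefix_collisions_py (model_names : List String) (out : List (String × String)) : Prop := out = find_prefix_collisions_py_alt model_names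
instance (model_names : List String) (out : List (String × String)) : Decidable (Spec_find_prefix_collisions_py model_names out) := by unfold Spec_find_prefix_collisions_py; infer_instance

-- ===== CLAIM (what is proved, stated in full; the proofs are below) =====
def Claim_equal_find_prefix_collisions_py : Prop := ∀ (model_names : List String), Dom_find_prefix_collisions_py model_names → Spec_find_prefix_collisions_py model_names (find_prefix_collisions_py model_names)

-- ===== LEMMAS AND PROOFS =====

-- all 2-element combinations, as a list of pairs (index-lexicographic order)
def pvPairs {α : Type} : List α → List (α × α)
  | [] => []
  | x :: xs => (xs.map (fun y => (x, y))) ++ pvPairs xs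

-- A's test and emitted value, on a pair of names
def pvCond (a b : String) : Bool :=
  (a != b) && (PySem.Str.startswith b a || PySem.Str.startswith a b)

def pvVal (a b : String) : String × String :=
  if PySem.Str.len a ≤ PySem.Str.len b then (a, b) else (b, a)

-- B's occurrence index, keyed list before sorting, and the sorted target list
def pvOccD (names : List String) : PySem.Dict String (List Int) :=
  (PySem.List.enumerate names).foldl
    (fun occ is => occ.insert is.2 (occ.getD is.2 [] ++ [is.1])) PySem.Dict.empty

def pvF (names : List String) (vs : Int × String) : List (Int × (String × String)) :=
  (PySem.List.pyRange 0 (PySem.Str.len vs.2)).flatMap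
    (fun L =>
      ((pvOccD names).getD (PySem.Str.slice vs.2 none (some L)) []).map
        (fun u =>
          (if u < vs.1 then u * (names.length : Int) + vs.1 else vs.1 * (names.length : Int) + u,
           (PySem.Str.slice vs.2 none (some L), vs.2))))

def pvKeyed (names : List String) : List (Int × (String × String)) :=
  (PySem.List.enumerate names).flatMap (pvF names)

def pvT (names : List String) : List (Int × (String × String)) :=
  (pvPairs (PySem.List.enumerate names)).filterMap
    (fun q =>
      if pvCond q.1.2 q.2.2 then
        some (q.1.1 * (names.length : Int) + q.2.1, pvVal q.1.2 q.2.2)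
      else none)

-- the property characterising membership in both pvKeyed and pvT
def pvPhi (names : List String) (e : Int × (String × String)) : Prop :=
  ∃ u v su sv, (u, su) ∈ PySem.List.enumerate names ∧ (v, sv) ∈ PySem.List.enumerate names ∧
    u < v ∧ pvCond su sv = true ∧ e = (u * (names.length : Int) + v, pvVal su sv)

theorem pvPairs_map {α β : Type} (f : α → β) (l : List α) :
    pvPairs (l.map f) = (pvPairs l).map (fun q => (f q.1, f q.2)) := by
  induction l with
  | nil => rfl
  | cons x xs ih => simp [pvPairs, ih, List.map_map]

theorem combinations_two {α : Type} (l : List α) :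
    PySem.List.combinations l 2 = (pvPairs l).map (fun q => [q.1, q.2]) := by
  induction l with
  | nil => rfl
  | cons x xs ih =>
    rw [show (2:Nat) = 1 + 1 from rfl] at *
    rw [PySem.List.combinations_cons_succ, PySem.List.combinations_one, ih]
    simp [pvPairs, List.map_map]

theorem portA_eq (names : List String) :
    find_prefix_collisions_py names =
      ((pvPairs names).filter (fun q => pvCond q.1 q.2)).map (fun q => pvVal q.1 q.2) := by
  unfold find_prefix_collisions_py
  rw [combinations_two, List.foldl_map]
  have h : ∀ (acc : List (String × String)) (q : String × String),
      (fun (collisions : List (String × String)) c =>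
        match c with
        | [a, b] =>
          if a != b then
            if PySem.Str.startswith b a || PySem.Str.startswith a b then
              collisions ++ [if PySem.Str.len a ≤ PySem.Str.len b then (a, b) else (b, a)]
            else collisions
          else collisions
        | _ => collisions) acc [q.1, q.2] =
      (if pvCond q.1 q.2 then acc ++ [pvVal q.1 q.2] else acc) := by
    intro acc q
    simp only [pvCond, pvVal, Bool.and_eq_true, bne_iff_ne]
    by_cases h1 : q.1 != q.2 <;>
      by_cases h2 : PySem.Str.startswith q.2 q.1 || PySem.Str.startswith q.1 q.2 <;> simp_all
  show List.foldl (fun acc (q : String × String) =>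
      if q.1 != q.2 then
        if PySem.Str.startswith q.2 q.1 || PySem.Str.startswith q.1 q.2 then
          acc ++ [if PySem.Str.len q.1 ≤ PySem.Str.len q.2 then (q.1, q.2) else (q.2, q.1)]
        else acc
      else acc) [] (pvPairs names) = _
  rw [show (fun acc (q : String × String) =>
      if q.1 != q.2 then
        if PySem.Str.startswith q.2 q.1 || PySem.Str.startswith q.1 q.2 then
          acc ++ [if PySem.Str.len q.1 ≤ PySem.Str.len q.2 then (q.1, q.2) else (q.2, q.1)]
        else acc
      else acc) = (fun acc (q : String × String) => if pvCond q.1 q.2 then acc ++ [pvVal q.1 q.2] else acc) from by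
    funext acc q; exact h acc q]
  rw [PySem.List.foldl_append_if]
  simp

theorem portB_eq (names : List String) :
    find_prefix_collisions_py_alt names =
      (PySem.List.sorted (pvKeyed names) (fun t => t.1)).map (fun t => t.2) := by
  have hinner : ∀ (vs : Int × String) (keyed : List (Int × (String × String))),
      (PySem.List.pyRange 0 (PySem.Str.len vs.2)).foldl
        (fun keyed L =>
          ((pvOccD names).getD (PySem.Str.slice vs.2 none (some L)) []).foldl
            (fun keyed u =>
              keyed ++ [(if u < vs.1 then u * (names.length : Int) + vs.1
                         else vs.1 * (names.length : Int) + u,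
                         (PySem.Str.slice vs.2 none (some L), vs.2))])
            keyed)
        keyed = keyed ++ pvF names vs := by
    intro vs keyed
    have hmap : (fun (keyed : List (Int × (String × String))) (L : Int) =>
        ((pvOccD names).getD (PySem.Str.slice vs.2 none (some L)) []).foldl
          (fun keyed u =>
            keyed ++ [(if u < vs.1 then u * (names.length : Int) + vs.1
                       else vs.1 * (names.length : Int) + u,
                       (PySem.Str.slice vs.2 none (some L), vs.2))])
          keyed) =
        (fun keyed L => keyed ++
          (((pvOccD names).getD (PySem.Str.slice vs.2 none (some L)) []).map
            (fun u =>
              (if u < vs.1 then u * (names.length : Int) + vs.1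
               else vs.1 * (names.length : Int) + u,
               (PySem.Str.slice vs.2 none (some L), vs.2))))) := by
      funext keyed L
      exact PySem.List.foldl_append_singleton_eq_map _ _ _
    rw [hmap, PySem.List.foldl_append_eq_flatMap]
    rfl
  have houter : (PySem.List.enumerate names).foldl
      (fun keyed vs =>
        (PySem.List.pyRange 0 (PySem.Str.len vs.2)).foldl
          (fun keyed L =>
            ((pvOccD names).getD (PySem.Str.slice vs.2 none (some L)) []).foldl
              (fun keyed u =>
                keyed ++ [(if u < vs.1 then u * (names.length : Int) + vs.1
                           else vs.1 * (names.length : Int) + u,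
                           (PySem.Str.slice vs.2 none (some L), vs.2))])
              keyed)
          keyed)
      [] = pvKeyed names := by
    rw [show (fun (keyed : List (Int × (String × String))) (vs : Int × String) =>
        (PySem.List.pyRange 0 (PySem.Str.len vs.2)).foldl
          (fun keyed L =>
            ((pvOccD names).getD (PySem.Str.slice vs.2 none (some L)) []).foldl
              (fun keyed u =>
                keyed ++ [(if u < vs.1 then u * (names.length : Int) + vs.1
                           else vs.1 * (names.length : Int) + u,
                           (PySem.Str.slice vs.2 none (some L), vs.2))])
              keyed)
          keyed) = (fun keyed vs => keyed ++ pvF names vs) from by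
      funext keyed vs; exact hinner vs keyed]
    rw [PySem.List.foldl_append_eq_flatMap]
    rfl
  rw [← houter]; rfl

-- membership in pvPairs, over a list with strictly increasing first components
theorem mem_pvPairs_iff {l : List (Int × String)} (h : (l.map Prod.fst).Pairwise (· < ·))
    (q : (Int × String) × (Int × String)) :
    q ∈ pvPairs l ↔ q.1 ∈ l ∧ q.2 ∈ l ∧ q.1.1 < q.2.1 := by
  induction l with
  | nil => simp [pvPairs]
  | cons x xs ih =>
    simp only [List.map_cons, List.pairwise_cons] at h
    obtain ⟨hx, hxs⟩ := h
    have hx' : ∀ y ∈ xs, x.1 < y.1 := by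
      intro y hy
      exact hx y.1 (List.mem_map_of_mem hy)
    constructor
    · intro hq
      simp only [pvPairs, List.mem_append, List.mem_map] at hq
      rcases hq with ⟨y, hy, hqy⟩ | hq
      · subst hqy
        exact ⟨List.mem_cons_self, List.mem_cons_of_mem _ hy, hx' y hy⟩
      · obtain ⟨h1, h2, h3⟩ := (ih hxs).mp hq
        exact ⟨List.mem_cons_of_mem _ h1, List.mem_cons_of_mem _ h2, h3⟩
    · rintro ⟨h1, h2, h3⟩
      simp only [pvPairs, List.mem_append, List.mem_map]
      rcases List.mem_cons.mp h1 with e1 | h1'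
      · rcases List.mem_cons.mp h2 with e2 | h2'
        · rw [e1, e2] at h3; exact absurd h3 (lt_irrefl _)
        · left; exact ⟨q.2, h2', by rw [← e1]⟩
      · rcases List.mem_cons.mp h2 with e2 | h2'
        · exfalso
          have := hx' q.1 h1'
          rw [e2] at h3
          omega
        · right; exact (ih hxs).mpr ⟨h1', h2', h3⟩

-- enumerate facts
theorem mem_enumerate_iff (names : List String) (e : Int × String) :
    e ∈ PySem.List.enumerate names ↔
      0 ≤ e.1 ∧ e.1 < (names.length : Int) ∧ e.2 = PySem.List.pyGetD names e.1 "" := by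
  rw [PySem.List.enumerate_eq_map_pyRange names ""]
  simp only [List.mem_map, PySem.List.mem_pyRange_one]
  constructor
  · rintro ⟨j, ⟨hj0, hjn⟩, he⟩
    subst he
    exact ⟨hj0, by simpa using hjn, rfl⟩
  · rintro ⟨h0, hn, he⟩
    exact ⟨e.1, ⟨h0, by simpa using hn⟩, by rw [← he]⟩

theorem enumerate_fst_pairwise (names : List String) :
    ((PySem.List.enumerate names).map Prod.fst).Pairwise (· < ·) := by
  rw [show (Prod.fst : Int × String → Int) = (fun x => x.1) from rfl, PySem.List.map_fst_enumerate]
  simpa using PySem.List.pairwise_lt_pyRange_one (a := 0) (b := (0 + (names.length : Int)))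

theorem enumerate_functional {names : List String} {u : Int} {s t : String}
    (hs : (u, s) ∈ PySem.List.enumerate names) (ht : (u, t) ∈ PySem.List.enumerate names) :
    s = t := by
  rw [mem_enumerate_iff] at hs ht
  exact (hs.2.2).trans (ht.2.2).symm

theorem occ_fold (l : List (Int × String)) (d : PySem.Dict String (List Int)) (p : String) :
    (l.foldl (fun occ is => occ.insert is.2 (occ.getD is.2 [] ++ [is.1])) d).getD p [] =
      d.getD p [] ++ (l.filter (fun e => e.2 == p)).map Prod.fst := by
  induction l generalizing d with
  | nil => simp
  | cons x xs ih =>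
    simp only [List.foldl_cons, List.filter_cons]
    rw [ih, PySem.Dict.getD_insert]
    by_cases h : p = x.2
    · simp [h]
    · have hb : (x.2 == p) = false := by
        simp [beq_eq_false_iff_ne]; exact fun e => h e.symm
      simp [h, hb]

-- the occurrence dictionary lists exactly the indices carrying a given name
theorem occ_getD (names : List String) (p : String) :
    (pvOccD names).getD p [] =
      ((PySem.List.enumerate names).filter (fun e => e.2 == p)).map Prod.fst := by
  unfold pvOccD
  rw [occ_fold]
  simp [PySem.Dict.getD, PySem.Dict.empty, PySem.Dict.get?]

theorem mem_occ_getD (names : List String) (p : String) (u : Int) :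
    u ∈ (pvOccD names).getD p [] ↔ (u, p) ∈ PySem.List.enumerate names := by
  rw [occ_getD]
  simp only [List.mem_map, List.mem_filter, beq_iff_eq]
  constructor
  · rintro ⟨e, ⟨he, hp⟩, hu⟩
    have : e = (u, p) := Prod.ext hu hp
    rwa [this] at he
  · intro h
    exact ⟨(u, p), ⟨h, rfl⟩, rfl⟩

-- string facts
theorem startswith_iff_prefix (s p : String) :
    PySem.Str.startswith s p = true ↔ p.toList <+: s.toList := by
  rw [PySem.Str.startswith_eq]
  exact PySem.Chars.startswith_iff _ _

theorem slice_toList (s : String) (L : Int) (h : 0 ≤ L) :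
    (PySem.Str.slice s none (some L)).toList = s.toList.take L.toNat := by
  simp [PySem.Str.slice, PySem.List.slice_to _ h]

theorem string_eq_iff_toList (s t : String) : s = t ↔ s.toList = t.toList := by
  constructor
  · intro h; rw [h]
  · intro h
    exact String.toList_injective h

-- a proper prefix is exactly a slice s[:L] with 0 ≤ L < len s
theorem proper_prefix_iff (p s : String) :
    (p.toList <+: s.toList ∧ p ≠ s) ↔
      ∃ L : Int, 0 ≤ L ∧ L < PySem.Str.len s ∧ p = PySem.Str.slice s none (some L) := by
  rw [PySem.Str.len_eq]
  constructor
  · rintro ⟨hpre, hne⟩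
    refine ⟨(p.toList.length : Int), by positivity, ?_, ?_⟩
    · have hle := hpre.length_le
      have : p.toList.length ≠ s.toList.length := by
        intro he
        exact hne ((string_eq_iff_toList p s).mpr (List.IsPrefix.eq_of_length hpre he))
      omega
    · rw [string_eq_iff_toList, slice_toList _ _ (by positivity)]
      simpa using List.prefix_iff_eq_take.mp hpre
  · rintro ⟨L, h0, hL, hp⟩
    have hlist : p.toList = s.toList.take L.toNat := by
      rw [hp, slice_toList _ _ h0]
    have hpre : p.toList <+: s.toList := by
      rw [hlist]; exact List.take_prefix _ _
    refine ⟨hpre, ?_⟩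
    intro he
    have : p.toList.length = s.toList.length := by rw [he]
    have hlen : p.toList.length = min L.toNat s.toList.length := by
      rw [hlist]; simp
    omega

-- key decoding: the encoded index pair determines (lo, hi)
theorem key_decode {n a b c d : Int} (ha : 0 ≤ a) (ha' : a < n) (hb : 0 ≤ b) (hb' : b < n)
    (hc : 0 ≤ c) (hc' : c < n) (hd : 0 ≤ d) (hd' : d < n) (hab : a ≠ b) (hcd : c ≠ d)
    (h : (if a < b then a * n + b else b * n + a) = (if c < d then c * n + d else d * n + c)) :
    (a = c ∧ b = d) ∨ (a = d ∧ b = c) := by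
  have key_unique : ∀ lo hi lo' hi' : Int, 0 ≤ lo → 0 ≤ hi → hi < n → 0 ≤ lo' → 0 ≤ hi' →
      hi' < n → lo * n + hi = lo' * n + hi' → lo = lo' ∧ hi = hi' := by
    intro lo hi lo' hi' hlo hhi hhin hlo' hhi' hhin' heq
    rcases lt_trichotomy lo lo' with hlt | heqq | hgt
    · exfalso
      have h1 : lo * n + n ≤ lo' * n := by nlinarith
      omega
    · constructor
      · exact heqq
      · rw [heqq] at heq; omega
    · exfalso
      have h1 : lo' * n + n ≤ lo * n := by nlinarith
      omega
  by_cases h1 : a < b <;> by_cases h2 : c < d <;> simp [h1, h2] at h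
  · have := key_unique a b c d ha hb hb' hc hd hd' h
    exact Or.inl this
  · have hdc : d < c := by omega
    have := key_unique a b d c ha hb hb' hd hc hc' h
    exact Or.inr ⟨this.1, this.2⟩
  · have hba : b < a := by omega
    have := key_unique b a c d hb ha ha' hc hd hd' h
    exact Or.inr ⟨this.2, this.1⟩
  · have hba : b < a := by omega
    have hdc : d < c := by omega
    have := key_unique b a d c hb ha ha' hd hc hc' h
    exact Or.inl ⟨this.2, this.1⟩

theorem proper_prefix_length_lt {p s : String} (hpre : p.toList <+: s.toList) (hne : p ≠ s) :
    p.toList.length < s.toList.length := by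
  have hle := hpre.length_le
  rcases lt_or_eq_of_le hle with h | h
  · exact h
  · exact absurd ((string_eq_iff_toList p s).mpr (List.IsPrefix.eq_of_length hpre h)) hne

theorem mem_E_bounds {names : List String} {e : Int × String}
    (h : e ∈ PySem.List.enumerate names) : 0 ≤ e.1 ∧ e.1 < (names.length : Int) := by
  have := (mem_enumerate_iff names e).mp h
  exact ⟨this.1, this.2.1⟩

-- what one block of B's generation loop produces, for an entry (v, sv) of the enumeration
def pvWit (names : List String) (v : Int) (sv : String) (e : Int × (String × String)) : Prop :=
  ∃ u su, (u, su) ∈ PySem.List.enumerate names ∧ su.toList <+: sv.toList ∧ su ≠ sv ∧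
    e = (if u < v then u * (names.length : Int) + v else v * (names.length : Int) + u, (su, sv))

theorem mem_F_iff (names : List String) (v : Int) (sv : String)
    (e : Int × (String × String)) :
    e ∈ pvF names (v, sv) ↔ pvWit names v sv e := by
  unfold pvF pvWit
  simp only [List.mem_flatMap, List.mem_map, PySem.List.mem_pyRange_one]
  constructor
  · rintro ⟨L, ⟨h0, hL⟩, u, hu, he⟩
    refine ⟨u, PySem.Str.slice sv none (some L), (mem_occ_getD names _ u).mp hu, ?_, ?_, he.symm⟩
    · have := (proper_prefix_iff (PySem.Str.slice sv none (some L)) sv).mpr ⟨L, h0, hL, rfl⟩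
      exact this.1
    · have := (proper_prefix_iff (PySem.Str.slice sv none (some L)) sv).mpr ⟨L, h0, hL, rfl⟩
      exact this.2
  · rintro ⟨u, su, hmem, hpre, hne, he⟩
    obtain ⟨L, h0, hL, hsl⟩ := (proper_prefix_iff su sv).mp ⟨hpre, hne⟩
    refine ⟨L, ⟨h0, hL⟩, u, ?_, ?_⟩
    · rw [← hsl]; exact (mem_occ_getD names su u).mpr hmem
    · rw [← hsl]; exact he.symm

-- membership characterisations
theorem mem_keyed_iff (names : List String) (e : Int × (String × String)) :
    e ∈ pvKeyed names ↔ pvPhi names e := by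
  unfold pvKeyed pvPhi
  rw [List.mem_flatMap]
  constructor
  · rintro ⟨⟨v, sv⟩, hvs, he⟩
    obtain ⟨u, su, humem, hpre, hne, heq⟩ := (mem_F_iff names v sv e).mp he
    have huv : u ≠ v := fun h => hne (enumerate_functional (h ▸ humem) hvs)
    have hlen : su.toList.length < sv.toList.length := proper_prefix_length_lt hpre hne
    have hsw : PySem.Str.startswith sv su = true := (startswith_iff_prefix sv su).mpr hpre
    rcases lt_or_gt_of_ne huv with hlt | hgt
    · refine ⟨u, v, su, sv, humem, hvs, hlt, ?_, ?_⟩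
      · simp only [pvCond, Bool.and_eq_true, Bool.or_eq_true, bne_iff_ne]
        exact ⟨hne, Or.inl hsw⟩
      · rw [heq]
        simp only [if_pos hlt, pvVal]
        rw [if_pos (by rw [PySem.Str.len_eq, PySem.Str.len_eq]; exact_mod_cast le_of_lt hlen)]
    · refine ⟨v, u, sv, su, hvs, humem, hgt, ?_, ?_⟩
      · simp only [pvCond, Bool.and_eq_true, Bool.or_eq_true, bne_iff_ne]
        exact ⟨fun h => hne h.symm, Or.inr hsw⟩
      · rw [heq]
        simp only [if_neg (by omega : ¬ u < v), pvVal]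
        rw [if_neg (by rw [PySem.Str.len_eq, PySem.Str.len_eq]; exact_mod_cast not_le_of_gt hlen)]
  · rintro ⟨u, v, su, sv, hu, hv, huv, hcond, he⟩
    simp only [pvCond, Bool.and_eq_true, Bool.or_eq_true, bne_iff_ne] at hcond
    obtain ⟨hne, hsw⟩ := hcond
    rcases hsw with hsw | hsw
    · have hpre : su.toList <+: sv.toList := (startswith_iff_prefix sv su).mp hsw
      have hlen : su.toList.length < sv.toList.length := proper_prefix_length_lt hpre hne
      refine ⟨(v, sv), hv, (mem_F_iff names v sv e).mpr ⟨u, su, hu, hpre, hne, ?_⟩⟩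
      rw [he]
      simp only [if_pos huv, pvVal]
      rw [if_pos (by rw [PySem.Str.len_eq, PySem.Str.len_eq]; exact_mod_cast le_of_lt hlen)]
    · have hpre : sv.toList <+: su.toList := (startswith_iff_prefix su sv).mp hsw
      have hne' : sv ≠ su := fun h => hne h.symm
      have hlen : sv.toList.length < su.toList.length := proper_prefix_length_lt hpre hne'
      refine ⟨(u, su), hu, (mem_F_iff names u su e).mpr ⟨v, sv, hv, hpre, hne', ?_⟩⟩
      rw [he]
      simp only [if_neg (by omega : ¬ v < u), pvVal]
      rw [if_neg (by rw [PySem.Str.len_eq, PySem.Str.len_eq]; exact_mod_cast not_le_of_gt hlen)]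

theorem mem_T_iff (names : List String) (e : Int × (String × String)) :
    e ∈ pvT names ↔ pvPhi names e := by
  unfold pvT pvPhi
  rw [List.mem_filterMap]
  constructor
  · rintro ⟨q, hq, hf⟩
    obtain ⟨h1, h2, h3⟩ := (mem_pvPairs_iff (enumerate_fst_pairwise names) q).mp hq
    by_cases hc : pvCond q.1.2 q.2.2 = true
    · rw [if_pos hc] at hf
      exact ⟨q.1.1, q.2.1, q.1.2, q.2.2, h1, h2, h3, hc, (Option.some_inj.mp hf).symm⟩
    · rw [if_neg hc] at hf
      exact absurd hf (by simp)
  · rintro ⟨u, v, su, sv, hu, hv, huv, hcond, he⟩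
    refine ⟨((u, su), (v, sv)), ?_, ?_⟩
    · exact (mem_pvPairs_iff (enumerate_fst_pairwise names) _).mpr ⟨hu, hv, huv⟩
    · rw [if_pos hcond, he]

theorem mem_pvPairs {α : Type} {l : List α} {q : α × α} (h : q ∈ pvPairs l) :
    q.1 ∈ l ∧ q.2 ∈ l := by
  induction l with
  | nil => simp [pvPairs] at h
  | cons x xs ih =>
    simp only [pvPairs, List.mem_append, List.mem_map] at h
    rcases h with ⟨y, hy, hqy⟩ | h
    · subst hqy
      exact ⟨List.mem_cons_self, List.mem_cons_of_mem _ hy⟩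
    · have := ih h
      exact ⟨List.mem_cons_of_mem _ this.1, List.mem_cons_of_mem _ this.2⟩

theorem pvPairs_pairwise_key (l : List (Int × String)) (n : Int)
    (h : (l.map Prod.fst).Pairwise (· < ·)) (hbd : ∀ x ∈ l, 0 ≤ x.1 ∧ x.1 < n) :
    (pvPairs l).Pairwise (fun q r => q.1.1 * n + q.2.1 < r.1.1 * n + r.2.1) := by
  induction l with
  | nil => exact List.Pairwise.nil
  | cons x xs ih =>
    simp only [List.map_cons, List.pairwise_cons] at h
    obtain ⟨hx, hxs⟩ := h
    have hx' : ∀ y ∈ xs, x.1 < y.1 := fun y hy => hx y.1 (List.mem_map_of_mem hy)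
    have hbd' : ∀ y ∈ xs, 0 ≤ y.1 ∧ y.1 < n := fun y hy => hbd y (List.mem_cons_of_mem _ hy)
    have hbx := hbd x List.mem_cons_self
    unfold pvPairs
    rw [List.pairwise_append]
    refine ⟨?_, ih hxs hbd', ?_⟩
    · rw [List.pairwise_map]
      have : xs.Pairwise (fun a b => a.1 < b.1) := List.pairwise_map.mp hxs
      exact this.imp (by intro a b hab; simpa using hab)
    · intro q hq r hr
      obtain ⟨y, hy, rfl⟩ := List.mem_map.mp hq
      obtain ⟨hr1, hr2⟩ := mem_pvPairs hr
      have h1 : x.1 < r.1.1 := hx' _ hr1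
      have h2 : y.1 < n := (hbd' _ hy).2
      have h3 : 0 ≤ r.2.1 := (hbd' _ hr2).1
      have h4 : 0 ≤ x.1 := hbx.1
      simp only
      nlinarith

-- order and distinctness
theorem T_pairwise (names : List String) :
    (pvT names).Pairwise (fun e f => e.1 < f.1) := by
  unfold pvT
  rw [List.pairwise_filterMap]
  have hp := pvPairs_pairwise_key (PySem.List.enumerate names) (names.length : Int)
    (enumerate_fst_pairwise names) (fun x hx => mem_E_bounds hx)
  refine hp.imp ?_
  intro q r hqr b hb b' hb'
  split at hb
  · split at hb'
    · rw [← Option.some_inj.mp hb, ← Option.some_inj.mp hb']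
      exact hqr
    · exact absurd hb' (by simp)
  · exact absurd hb (by simp)

theorem occ_pairwise (names : List String) (p : String) :
    ((pvOccD names).getD p []).Pairwise (· < ·) := by
  rw [occ_getD, List.pairwise_map]
  have hE : (PySem.List.enumerate names).Pairwise (fun e f => e.1 < f.1) :=
    List.pairwise_map.mp (enumerate_fst_pairwise names)
  exact (hE.sublist List.filter_sublist).imp (fun h => h)

theorem keyed_nodup (names : List String) : (pvKeyed names).Nodup := by
  have hkey : (pvKeyed names).Pairwise (fun e f => e.1 ≠ f.1) := by
    unfold pvKeyed
    rw [List.pairwise_flatMap]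
    have hE : (PySem.List.enumerate names).Pairwise (fun e f => e.1 < f.1) :=
      List.pairwise_map.mp (enumerate_fst_pairwise names)
    constructor
    · -- within one block: all keys generated for a fixed (v, sv) are distinct
      rintro ⟨v, sv⟩ hvs
      have hbv := mem_E_bounds hvs
      unfold pvF
      rw [List.pairwise_flatMap]
      constructor
      · -- same prefix length L: distinct indices u give distinct keys
        intro L hL
        obtain ⟨hL0, hLlen⟩ := PySem.List.mem_pyRange_one.mp hL
        have hprop := (proper_prefix_iff (PySem.Str.slice sv none (some L)) sv).mpr
          ⟨L, hL0, hLlen, rfl⟩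
        rw [List.pairwise_map]
        refine (occ_pairwise names _).imp_of_mem ?_
        intro u u' hu hu' hlt heq
        have hue := (mem_occ_getD names _ u).mp hu
        have hue' := (mem_occ_getD names _ u').mp hu'
        have hbu := mem_E_bounds hue
        have hbu' := mem_E_bounds hue'
        have huv : u ≠ v := fun h => hprop.2 (enumerate_functional (h ▸ hue) hvs)
        have huv' : u' ≠ v := fun h => hprop.2 (enumerate_functional (h ▸ hue') hvs)
        have := key_decode hbu.1 hbu.2 hbv.1 hbv.2 hbu'.1 hbu'.2 hbv.1 hbv.2 huv huv' heq
        rcases this with ⟨h1, _⟩ | ⟨h1, h2⟩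
        · omega
        · exact huv h1
      · -- different prefix lengths L < L' give distinct keys
        refine (PySem.List.pairwise_lt_pyRange_one (a := 0)
          (b := PySem.Str.len sv)).imp_of_mem ?_
        intro L L' hL hL' hlt x hx y hy
        obtain ⟨hL0, hLlen⟩ := PySem.List.mem_pyRange_one.mp hL
        obtain ⟨hL0', hLlen'⟩ := PySem.List.mem_pyRange_one.mp hL'
        obtain ⟨u, hu, rfl⟩ := List.mem_map.mp hx
        obtain ⟨u', hu', rfl⟩ := List.mem_map.mp hy
        have hue := (mem_occ_getD names _ u).mp hu
        have hue' := (mem_occ_getD names _ u').mp hu'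
        have hbu := mem_E_bounds hue
        have hbu' := mem_E_bounds hue'
        have hprop := (proper_prefix_iff (PySem.Str.slice sv none (some L)) sv).mpr
          ⟨L, hL0, hLlen, rfl⟩
        have hprop' := (proper_prefix_iff (PySem.Str.slice sv none (some L')) sv).mpr
          ⟨L', hL0', hLlen', rfl⟩
        have huv : u ≠ v := fun h => hprop.2 (enumerate_functional (h ▸ hue) hvs)
        have huv' : u' ≠ v := fun h => hprop'.2 (enumerate_functional (h ▸ hue') hvs)
        intro heq
        simp only at heq
        have := key_decode hbu.1 hbu.2 hbv.1 hbv.2 hbu'.1 hbu'.2 hbv.1 hbv.2 huv huv' heq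
        have huu : u = u' := by
          rcases this with ⟨h1, _⟩ | ⟨h1, h2⟩
          · exact h1
          · exact absurd h1 huv
        -- same index carries the same name, so the two prefixes coincide, forcing L = L'
        have hpp : PySem.Str.slice sv none (some L) = PySem.Str.slice sv none (some L') :=
          enumerate_functional hue (huu ▸ hue')
        have hlen : ((PySem.Str.slice sv none (some L)).toList).length = L.toNat := by
          rw [slice_toList _ _ hL0, List.length_take]
          rw [PySem.Str.len_eq] at hLlen
          omega
        have hlen' : ((PySem.Str.slice sv none (some L')).toList).length = L'.toNat := by
          rw [slice_toList _ _ hL0', List.length_take]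
          rw [PySem.Str.len_eq] at hLlen'
          omega
        rw [hpp, hlen'] at hlen
        omega
    · -- across blocks: keys from different outer indices v < v' are distinct
      refine hE.imp_of_mem ?_
      rintro ⟨v, sv⟩ ⟨v', sv'⟩ hvs hvs' hlt x hx y hy
      have hbv := mem_E_bounds hvs
      have hbv' := mem_E_bounds hvs'
      obtain ⟨u, su, hue, hpre, hne, rfl⟩ := (mem_F_iff names v sv x).mp hx
      obtain ⟨u', su', hue', hpre', hne', rfl⟩ := (mem_F_iff names v' sv' y).mp hy
      have hbu := mem_E_bounds hue
      have hbu' := mem_E_bounds hue'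
      have huv : u ≠ v := fun h => hne (enumerate_functional (h ▸ hue) hvs)
      have huv' : u' ≠ v' := fun h => hne' (enumerate_functional (h ▸ hue') hvs')
      intro heq
      simp only at heq
      have := key_decode hbu.1 hbu.2 hbv.1 hbv.2 hbu'.1 hbu'.2 hbv'.1 hbv'.2 huv huv' heq
      rcases this with ⟨h1, h2⟩ | ⟨h1, h2⟩
      · simp only at hlt; omega
      · -- u = v' and v = u': the two names would each be a proper prefix of the other
        have hu1 : u = v' := h1
        have hu2 : u' = v := h2.symm
        have e1 : su = sv' := enumerate_functional (by rw [← hu1]; exact hue) hvs'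
        have e2 : su' = sv := enumerate_functional (by rw [← hu2]; exact hue') hvs
        rw [e1] at hpre hne
        rw [e2] at hpre'
        have := List.IsPrefix.eq_of_length hpre
          (le_antisymm hpre.length_le hpre'.length_le)
        exact hne ((string_eq_iff_toList sv' sv).mpr this)
  exact hkey.imp (fun h => fun he => h (congrArg Prod.fst he))

theorem map_snd_filterMap {α : Type} (l : List α) (p : α → Bool) (k : α → Int)
    (v : α → String × String) :
    ((l.filterMap (fun q => if p q then some (k q, v q) else none)).map Prod.snd) =
      (l.filter p).map v := by
  induction l with
  | nil => rfl
  | cons x xs ih =>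
    by_cases h : p x <;> simp [h, ih]

theorem T_map_snd (names : List String) :
    (pvT names).map Prod.snd = find_prefix_collisions_py names := by
  rw [portA_eq]
  have hnames : pvPairs names =
      (pvPairs (PySem.List.enumerate names)).map (fun q => (q.1.2, q.2.2)) := by
    conv_lhs => rw [← PySem.List.map_snd_enumerate names 0]
    rw [pvPairs_map]
  rw [hnames, List.filter_map, List.map_map]
  unfold pvT
  rw [map_snd_filterMap (pvPairs (PySem.List.enumerate names))
    (fun q => pvCond q.1.2 q.2.2) (fun q => q.1.1 * (names.length : Int) + q.2.1)
    (fun q => pvVal q.1.2 q.2.2)]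
  rfl

-- ===== VERDICT (by name: the statement is the Claim_ definition above) =====
theorem find_prefix_collisions_py_spec : Claim_equal_find_prefix_collisions_py := by
  intro names _
  unfold Spec_find_prefix_collisions_py
  have hT : (pvT names).Pairwise (fun e f => e.1 < f.1) := T_pairwise names
  have hTnd : (pvT names).Nodup := by
    exact hT.imp (fun h => by intro he; subst he; exact lt_irrefl _ h)
  have hperm : (pvT names).Perm (pvKeyed names) := by
    rw [List.perm_ext_iff_of_nodup hTnd (keyed_nodup names)]
    intro e; rw [mem_T_iff, mem_keyed_iff]
  have hsorted : PySem.List.sorted (pvKeyed names) (fun t => t.1) = pvT names :=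
    PySem.List.sorted_eq_of_perm_of_pairwise_lt _ _ _ hperm hT
  rw [portB_eq, hsorted, T_map_snd]
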